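-- pv_equiv track=rewrite | github.com/A-0-K/2023-2024 | silver_spring/comp jan/majority.py | find_like_hay_all_tests
-- ===== SOURCE A (Python) =====
-- def find_like_hay_all_tests(num_tests, all_tests):
--     all_results = []
--
--     for i in range(num_tests):
--         ntest = all_tests[i][0]
--         test = all_tests[i][1:]
--         result = find_like_hay(ntest, test)
--         all_results.append(result)
--
--     return all_results
--
-- def find_like_in_three(hays):
--     counter = {}
--     ret = -1
--     for h in hays:
--         if h not in counter:
--             counter[h] = 1
--         else:
--             counter[h] += 1
--             ret = h
--             break
--     return ret
--
-- def find_like_hay(ncows, hays):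
--     rets = []
--     hays_liked = [0]*ncows
--     if ncows == 1:
--         rets.append(-1)
--     elif ncows == 2:
--         if hays[0] == hays[1]:
--             rets.append(hays[0])
--         else:
--             rets.append(-1)
--     else:
--
--         for i in range(ncows-2):
--
--             most_like = find_like_in_three(hays[i:i+3])
--             if most_like == -1:
--                 pass
--             else:
--                 hays_liked[most_like-1] = 1
--
--         for i in range(ncows):
--             if hays_liked[i] == 1:
--                 rets.append(i+1)
--         if len(rets) == 0:
--             rets = [-1]
--     return rets
-- ===== SOURCE B (Python) =====
-- def find_like_hay_all_tests(num_tests, all_tests):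
--     results = []
--     for i in range(num_tests):
--         ncows = all_tests[i][0]
--         hays = all_tests[i][1:]
--         results.append(_find_like_hay_b(ncows, hays))
--     return results
--
--
-- def _find_like_hay_b(ncows, hays):
--     if ncows == 1:
--         return [-1]
--     if ncows == 2:
--         return [hays[0]] if hays[0] == hays[1] else [-1]
--     liked = [0] * ncows
--     m = min(ncows, len(hays))
--     for q in range(1, m):
--         if hays[q] == hays[q - 1] or (q >= 2 and hays[q] == hays[q - 2]):
--             liked[hays[q] - 1] = 1
--     rets = [i + 1 for i in range(ncows) if liked[i] == 1]
--     return rets if rets else [-1]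
-- ===== Notes on version B (the rewrite author's own statement) =====
-- stated objective: alternative
-- what changed: Replaces A's per-window helper (a dict counter built over each 3-slice to find its duplicate) with a single direct scan that marks a cow whenever two equal hay values occur at distance 1 or 2; Pre_ excludes tests whose liked hay value would fall outside Python's index range (A raises IndexError) and tests where hay value -1 forms an equal pair within distance 2, where A's silent skip is a collision with its internal not-found sentinel and B's negative-index mark is equally accidental.
-- outside the precondition, e.g. on find_like_hay_all_tests(1, [[3, -1, -1, 2]]): A returns [[-1]], B returns [[2]]
import Mathlib
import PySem

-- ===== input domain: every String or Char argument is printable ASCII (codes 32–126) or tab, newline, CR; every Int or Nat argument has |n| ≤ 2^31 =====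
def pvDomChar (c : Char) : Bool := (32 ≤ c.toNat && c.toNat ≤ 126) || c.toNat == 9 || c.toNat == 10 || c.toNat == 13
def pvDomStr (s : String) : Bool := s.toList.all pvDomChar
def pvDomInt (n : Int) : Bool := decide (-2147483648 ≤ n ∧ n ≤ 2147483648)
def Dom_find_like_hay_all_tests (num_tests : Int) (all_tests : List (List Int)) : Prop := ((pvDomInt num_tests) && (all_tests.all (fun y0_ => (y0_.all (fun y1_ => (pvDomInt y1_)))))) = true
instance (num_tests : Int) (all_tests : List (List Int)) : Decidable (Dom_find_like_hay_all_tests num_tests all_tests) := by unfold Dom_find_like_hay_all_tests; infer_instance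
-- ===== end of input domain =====

-- B replaces A's per-window dict-counter helper by a direct scan marking equal pairs at distance 1 or 2 (alternative decomposition; return value only).

-- ===== PORT A =====
def findLikeInThreeLoop (hays : List Int) (counter : PySem.Dict Int Int) (ret : Int) : Int :=
  match hays with
  | [] => ret
  | h :: rest =>
    match counter.get? h with
    | none => findLikeInThreeLoop rest (counter.insert h 1) ret
    | some c => let _ := counter.insert h (c + 1); h

def find_like_in_three (hays : List Int) : Int :=
  findLikeInThreeLoop hays PySem.Dict.empty (-1)

def find_like_hay (ncows : Int) (hays : List Int) : List Int :=
  let rets : List Int := []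
  let hays_liked : List Int := List.replicate ncows.toNat 0
  if ncows = 1 then rets ++ [(-1 : Int)]
  else if ncows = 2 then
    (if PySem.List.pyGetD hays 0 0 = PySem.List.pyGetD hays 1 0
     then rets ++ [PySem.List.pyGetD hays 0 0] else rets ++ [(-1 : Int)])
  else
    let hays_liked := (PySem.List.pyRange 0 (ncows - 2) 1).foldl (fun hl i =>
        let most_like := find_like_in_three (PySem.List.slice hays (some i) (some (i + 3)))
        if most_like = -1 then hl else PySem.List.pySetD hl (most_like - 1) 1) hays_liked
    let rets := (PySem.List.pyRange 0 ncows 1).foldl (fun r i =>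
        if PySem.List.pyGetD hays_liked i 0 = 1 then r ++ [i + 1] else r) rets
    if rets.length = 0 then [(-1 : Int)] else rets

def find_like_hay_all_tests (num_tests : Int) (all_tests : List (List Int)) : List (List Int) :=
  (PySem.List.pyRange 0 num_tests 1).foldl (fun all_results i =>
    let t := PySem.List.pyGetD all_tests i []
    let ntest := PySem.List.pyGetD t 0 0
    let test := PySem.List.slice t (some 1) none
    all_results ++ [find_like_hay ntest test]) []

-- ===== PORT B =====
def findLikeHayB (ncows : Int) (hays : List Int) : List Int :=
  if ncows = 1 then [(-1 : Int)]
  else if ncows = 2 then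
    (if PySem.List.pyGetD hays 0 0 = PySem.List.pyGetD hays 1 0
     then [PySem.List.pyGetD hays 0 0] else [(-1 : Int)])
  else
    let liked := (PySem.List.pyRange 1 (min ncows (hays.length : Int)) 1).foldl (fun lk q =>
        if PySem.List.pyGetD hays q 0 = PySem.List.pyGetD hays (q - 1) 0 ∨
           (2 ≤ q ∧ PySem.List.pyGetD hays q 0 = PySem.List.pyGetD hays (q - 2) 0)
        then PySem.List.pySetD lk (PySem.List.pyGetD hays q 0 - 1) 1 else lk)
      (List.replicate ncows.toNat (0 : Int))
    let rets := ((PySem.List.pyRange 0 ncows 1).filter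
        (fun i => PySem.List.pyGetD liked i 0 == 1)).map (fun i => i + 1)
    if rets = [] then [(-1 : Int)] else rets

def find_like_hay_all_tests_alt (num_tests : Int) (all_tests : List (List Int)) : List (List Int) :=
  (PySem.List.pyRange 0 num_tests 1).foldl (fun results i =>
    let t := PySem.List.pyGetD all_tests i []
    results ++ [findLikeHayB (PySem.List.pyGetD t 0 0) (PySem.List.slice t (some 1) none)]) []

-- ===== PRECONDITION & SPEC =====
-- Pre_ admits exactly the inputs where Python A returns normally, minus one unspecifiable corner:
-- it excludes num_tests beyond the list, empty tests (IndexError on test[0]), ncows=2 with fewer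
-- than two hays, tests where a marked hay value falls outside Python's index range [1-ncows, ncows]
-- for hays_liked (IndexError in A), and — the one exclusion where A still RETURNS — tests where hay
-- value -1 forms an equal pair within distance 2: there A's silent skip is a collision with its
-- internal not-found sentinel and B's negative-index mark is equally accidental, so neither value
-- is the specified one.
def PreHay (n : Int) (h : List Int) : Prop :=
  if n = 1 then True
  else if n = 2 then 2 ≤ h.length
  else ∀ q : Nat, q < h.length → (q : Int) < n → 1 ≤ q →
    (h.getD q 0 = h.getD (q - 1) 0 ∨ (2 ≤ q ∧ h.getD q 0 = h.getD (q - 2) 0)) →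
    (1 - n ≤ h.getD q 0 ∧ h.getD q 0 ≤ n)

-- the excluded returning corner: hay value -1 forms an equal pair at distance ≤ 2
def NegPairHay (n : Int) (h : List Int) : Prop :=
  n ≠ 1 ∧ n ≠ 2 ∧ ∃ u < min n.toNat h.length,
    h.getD u 0 = -1 ∧ (h.getD (u - 1) 0 = -1 ∧ 1 ≤ u ∨ h.getD (u - 2) 0 = -1 ∧ 2 ≤ u)

-- Bool twin of PreHay (structural recursion only, so that `decide` evaluates fast)
def preHayB (n : Int) (h : List Int) : Bool :=
  if n = 1 then true
  else if n = 2 then decide (2 ≤ h.length)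
  else (List.range h.length).all (fun q =>
    decide ((q : Int) < n → 1 ≤ q →
      (h.getD q 0 = h.getD (q - 1) 0 ∨ (2 ≤ q ∧ h.getD q 0 = h.getD (q - 2) 0)) →
      (1 - n ≤ h.getD q 0 ∧ h.getD q 0 ≤ n)))

-- Bool twin of NegPairHay
def negPairHayB (n : Int) (h : List Int) : Bool :=
  decide (n ≠ 1) && decide (n ≠ 2) &&
  (List.range (min n.toNat h.length)).any (fun u =>
    decide (h.getD u 0 = -1 ∧
      (h.getD (u - 1) 0 = -1 ∧ 1 ≤ u ∨ h.getD (u - 2) 0 = -1 ∧ 2 ≤ u)))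

def Pre_find_like_hay_all_tests (num_tests : Int) (all_tests : List (List Int)) : Prop :=
  num_tests ≤ (all_tests.length : Int) ∧
  ∀ t ∈ all_tests.take num_tests.toNat,
    t ≠ [] ∧ PreHay (t.getD 0 0) t.tail ∧ ¬ NegPairHay (t.getD 0 0) t.tail

instance (num_tests : Int) (all_tests : List (List Int)) : Decidable (Pre_find_like_hay_all_tests num_tests all_tests) := by
  unfold Pre_find_like_hay_all_tests
  letI : ∀ (n : Int) (hh : List Int), Decidable (PreHay n hh) := fun n hh =>
    decidable_of_iff (preHayB n hh = true) (by
      unfold preHayB PreHay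
      split_ifs
      · simp
      · simp
      · simp only [List.all_eq_true, List.mem_range, decide_eq_true_eq])
  letI : ∀ (n : Int) (hh : List Int), Decidable (NegPairHay n hh) := fun n hh =>
    decidable_of_iff (negPairHayB n hh = true) (by
      unfold negPairHayB NegPairHay
      simp only [Bool.and_eq_true, List.any_eq_true, List.mem_range, decide_eq_true_eq]
      exact and_assoc)
  infer_instance

def pvWitness_find_like_hay_all_tests : Int × List (List Int) := (1, [[3, 1, 1, 2]])

def Spec_find_like_hay_all_tests (num_tests : Int) (all_tests : List (List Int)) (out : List (List Int)) : Prop :=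
  out = find_like_hay_all_tests_alt num_tests all_tests

instance (num_tests : Int) (all_tests : List (List Int)) (out : List (List Int)) : Decidable (Spec_find_like_hay_all_tests num_tests all_tests out) := by
  unfold Spec_find_like_hay_all_tests; infer_instance

-- ===== CLAIM (what is proved, stated in full; the proofs are below) =====
def Claim_equal_find_like_hay_all_tests : Prop := ∀ (num_tests : Int) (all_tests : List (List Int)), Dom_find_like_hay_all_tests num_tests all_tests → Pre_find_like_hay_all_tests num_tests all_tests → Spec_find_like_hay_all_tests num_tests all_tests (find_like_hay_all_tests num_tests all_tests)

-- ===== LEMMAS AND PROOFS =====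

-- normalized (Python-style) index into a list of length L
def normN (L : Nat) (k : Int) : Nat := (if k < 0 then k + L else k).toNat

theorem normN_lt (L : Nat) (k : Int) (h1 : -(L : Int) ≤ k) (h2 : k < L) : normN L k < L := by
  unfold normN; split_ifs <;> omega

theorem pySetD_eq_set (l : List Int) (k v : Int) (h1 : -(l.length : Int) ≤ k)
    (_h2 : k < l.length) : PySem.List.pySetD l k v = l.set (normN l.length k) v := by
  by_cases hk : 0 ≤ k
  · rw [PySem.List.pySetD_of_nonneg l v hk]
    unfold normN
    rw [if_neg (by omega)]
  · unfold PySem.List.pySetD PySem.List.pySet? PySem.List.pyIdx? normN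
    rw [if_neg hk, if_pos (by omega)]
    simp only [Option.map_some, Option.getD_some]
    congr 1
    omega

theorem mark_getElem? (cond : Int → Prop) [DecidablePred cond] (key : Int → Int)
    (xs : List Int) (init : List Int) (j : Nat)
    (hr : ∀ x ∈ xs, cond x → (-(init.length : Int) ≤ key x ∧ key x < init.length)) :
    (xs.foldl (fun acc x => if cond x then PySem.List.pySetD acc (key x) 1 else acc) init)[j]?
      = if ∃ x ∈ xs, cond x ∧ normN init.length (key x) = j then some 1 else init[j]? := by
  induction xs generalizing init with
  | nil => simp
  | cons x xs ih =>
    simp only [List.foldl_cons]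
    by_cases hc : cond x
    · rw [if_pos hc]
      obtain ⟨hk1, hk2⟩ := hr x List.mem_cons_self hc
      rw [pySetD_eq_set init (key x) 1 hk1 hk2]
      have hlen : (init.set (normN init.length (key x)) 1).length = init.length := by simp
      rw [ih (init.set (normN init.length (key x)) 1)
        (by rw [hlen]; exact fun y hy hcy => hr y (List.mem_cons_of_mem _ hy) hcy)]
      rw [hlen]
      by_cases hex : ∃ y ∈ xs, cond y ∧ normN init.length (key y) = j
      · obtain ⟨y, hy, hcy, hny⟩ := hex
        rw [if_pos ⟨y, hy, hcy, hny⟩, if_pos ⟨y, List.mem_cons_of_mem _ hy, hcy, hny⟩]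
      · rw [if_neg hex]
        by_cases hj : normN init.length (key x) = j
        · rw [if_pos ⟨x, List.mem_cons_self, hc, hj⟩]
          subst hj
          exact List.getElem?_set_self (normN_lt _ _ hk1 hk2)
        · rw [List.getElem?_set_ne hj, if_neg]
          rintro ⟨y, hy, hcy, hny⟩
          rcases List.mem_cons.mp hy with rfl | hy'
          · exact hj hny
          · exact hex ⟨y, hy', hcy, hny⟩
    · rw [if_neg hc, ih init (fun y hy hcy => hr y (List.mem_cons_of_mem _ hy) hcy)]
      have hiff : (∃ y ∈ xs, cond y ∧ normN init.length (key y) = j)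
          ↔ (∃ y ∈ x :: xs, cond y ∧ normN init.length (key y) = j) := by
        constructor
        · rintro ⟨y, hy, hcy, hny⟩; exact ⟨y, List.mem_cons_of_mem _ hy, hcy, hny⟩
        · rintro ⟨y, hy, hcy, hny⟩
          rcases List.mem_cons.mp hy with rfl | hy'
          · exact absurd hcy hc
          · exact ⟨y, hy', hcy, hny⟩
      rw [if_congr hiff rfl rfl]

theorem f3_one (a : Int) : find_like_in_three [a] = -1 := by
  simp [find_like_in_three, findLikeInThreeLoop, PySem.Dict.get?_empty]

theorem f3_two (a b : Int) : find_like_in_three [a, b] = if b = a then b else -1 := by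
  by_cases hba : b = a <;>
    simp [find_like_in_three, findLikeInThreeLoop, PySem.Dict.get?_empty,
      PySem.Dict.get?_insert, hba]

theorem f3_three (a b c : Int) :
    find_like_in_three [a, b, c] = if b = a then b else if c = b ∨ c = a then c else -1 := by
  by_cases hba : b = a
  · simp [find_like_in_three, findLikeInThreeLoop, PySem.Dict.get?_empty, hba]
  · by_cases hca : c = a <;> by_cases hcb : c = b <;>
      simp [find_like_in_three, findLikeInThreeLoop, PySem.Dict.get?_empty,
        PySem.Dict.get?_insert, hba, hca, hcb]

theorem window_cases (h : List Int) (iN : Nat) (hlt : iN < h.length) :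
    (h.length = iN + 1 ∧ (h.drop iN).take 3 = [h.getD iN 0]) ∨
    (h.length = iN + 2 ∧ (h.drop iN).take 3 = [h.getD iN 0, h.getD (iN+1) 0]) ∨
    (iN + 3 ≤ h.length ∧
      (h.drop iN).take 3 = [h.getD iN 0, h.getD (iN+1) 0, h.getD (iN+2) 0]) := by
  rcases lt_trichotomy h.length (iN + 2) with h1 | h1 | h1
  · left
    refine ⟨by omega, ?_⟩
    rw [List.drop_eq_getElem_cons hlt, List.getD_eq_getElem h 0 hlt]
    have hnil : h.drop (iN + 1) = [] := List.drop_eq_nil_of_le (by omega)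
    rw [hnil]
    rfl
  · right; left
    refine ⟨h1, ?_⟩
    rw [List.drop_eq_getElem_cons hlt, List.drop_eq_getElem_cons (show iN + 1 < h.length by omega)]
    have hnil : h.drop (iN + 2) = [] := List.drop_eq_nil_of_le (by omega)
    rw [hnil, List.getD_eq_getElem h 0 hlt, List.getD_eq_getElem h 0 (show iN + 1 < h.length by omega)]
    rfl
  · right; right
    refine ⟨by omega, ?_⟩
    rw [List.drop_eq_getElem_cons hlt, List.drop_eq_getElem_cons (show iN + 1 < h.length by omega),
      List.drop_eq_getElem_cons (show iN + 2 < h.length by omega),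
      List.getD_eq_getElem h 0 hlt, List.getD_eq_getElem h 0 (show iN + 1 < h.length by omega),
      List.getD_eq_getElem h 0 (show iN + 2 < h.length by omega)]
    rfl

theorem pair_of_window (n : Int) (h : List Int) (iN : Nat) (hi : (iN : Int) < n - 2)
    (v : Int) (hv : find_like_in_three ((h.drop iN).take 3) = v) (hne : v ≠ -1) :
    ∃ q : Nat, q < h.length ∧ (q : Int) < n ∧ 1 ≤ q ∧ h.getD q 0 = v ∧
      (h.getD q 0 = h.getD (q-1) 0 ∨ (2 ≤ q ∧ h.getD q 0 = h.getD (q-2) 0)) := by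
  by_cases hlt : iN < h.length
  · rcases window_cases h iN hlt with ⟨hl, hw⟩ | ⟨hl, hw⟩ | ⟨hl, hw⟩
    · rw [hw, f3_one] at hv
      exact absurd hv.symm hne
    · rw [hw, f3_two] at hv
      split_ifs at hv with he
      · refine ⟨iN + 1, by omega, by push_cast; omega, by omega, hv, Or.inl ?_⟩
        simpa using he
      · exact absurd hv.symm hne
    · rw [hw, f3_three] at hv
      split_ifs at hv with he1 he2
      · refine ⟨iN + 1, by omega, by push_cast; omega, by omega, hv, Or.inl ?_⟩
        simpa using he1
      · rcases he2 with hcb | hca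
        · refine ⟨iN + 2, by omega, by push_cast; omega, by omega, hv, Or.inl ?_⟩
          simpa using hcb
        · refine ⟨iN + 2, by omega, by push_cast; omega, by omega, hv,
            Or.inr ⟨by omega, ?_⟩⟩
          simpa using hca
      · exact absurd hv.symm hne
  · have hnil : h.drop iN = [] := List.drop_eq_nil_of_le (by omega)
    rw [hnil] at hv
    exact absurd hv.symm hne

theorem window_of_pair (n : Int) (h : List Int) (qN : Nat) (hq : qN < h.length)
    (hqn : (qN : Int) < n) (hq1 : 1 ≤ qN) (hn3 : 3 ≤ n)
    (hpair : h.getD qN 0 = h.getD (qN-1) 0 ∨ (2 ≤ qN ∧ h.getD qN 0 = h.getD (qN-2) 0)) :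
    ∃ iN : Nat, (iN : Int) < n - 2 ∧
      find_like_in_three ((h.drop iN).take 3) = h.getD qN 0 := by
  rcases hpair with hp | ⟨hq2, hp⟩
  · by_cases hqle : (qN : Int) < n - 1
    · refine ⟨qN - 1, by omega, ?_⟩
      rcases window_cases h (qN - 1) (by omega) with ⟨hl, hw⟩ | ⟨hl, hw⟩ | ⟨hl, hw⟩
      · omega
      · have e1 : qN - 1 + 1 = qN := by omega
        rw [e1] at hw
        rw [hw, f3_two, if_pos hp]
      · have e1 : qN - 1 + 1 = qN := by omega
        rw [e1] at hw
        rw [hw, f3_three, if_pos hp]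
    · -- qN = n - 1; use the window starting at qN - 2
      have hq2 : 2 ≤ qN := by omega
      refine ⟨qN - 2, by omega, ?_⟩
      rcases window_cases h (qN - 2) (by omega) with ⟨hl, hw⟩ | ⟨hl, hw⟩ | ⟨hl, hw⟩
      · omega
      · omega
      · have e1 : qN - 2 + 1 = qN - 1 := by omega
        have e2 : qN - 2 + 2 = qN := by omega
        rw [e1, e2] at hw
        rw [hw, f3_three]
        split_ifs with h1 h2
        · exact hp.symm
        · rfl
        · exact absurd (Or.inl hp) h2
  · refine ⟨qN - 2, by omega, ?_⟩
    rcases window_cases h (qN - 2) (by omega) with ⟨hl, hw⟩ | ⟨hl, hw⟩ | ⟨hl, hw⟩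
    · omega
    · omega
    · have e1 : qN - 2 + 1 = qN - 1 := by omega
      have e2 : qN - 2 + 2 = qN := by omega
      rw [e1, e2] at hw
      rw [hw, f3_three]
      split_ifs with h1 h2
      · rw [h1]
        exact hp.symm
      · rfl
      · exact absurd (Or.inr hp) h2

theorem foldl_append_ite_map (p : Int → Prop) [DecidablePred p] (f : Int → Int)
    (l : List Int) (acc : List Int) :
    l.foldl (fun r i => if p i then r ++ [f i] else r) acc
      = acc ++ (l.filter (fun i => decide (p i))).map f := by
  induction l generalizing acc with
  | nil => simp
  | cons x xs ih =>
    simp only [List.foldl_cons, List.filter_cons]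
    by_cases hp : p x
    · rw [if_pos hp, ih]
      simp [hp]
    · rw [if_neg hp, ih]
      simp [hp]

theorem mark_getElem?_skip (cond : Int → Prop) [DecidablePred cond] (key : Int → Int)
    (xs : List Int) (init : List Int) (j : Nat)
    (hr : ∀ x ∈ xs, ¬ cond x → (-(init.length : Int) ≤ key x ∧ key x < init.length)) :
    (xs.foldl (fun acc x => if cond x then acc else PySem.List.pySetD acc (key x) 1) init)[j]?
      = if ∃ x ∈ xs, ¬ cond x ∧ normN init.length (key x) = j then some 1 else init[j]? := by
  have e : (fun (acc : List Int) (x : Int) =>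
      if cond x then acc else PySem.List.pySetD acc (key x) 1)
      = (fun acc x => if ¬ cond x then PySem.List.pySetD acc (key x) 1 else acc) := by
    funext acc x
    exact (ite_not _ _ _).symm
  rw [e]
  exact mark_getElem? (fun x => ¬ cond x) key xs init j hr

theorem tail_eq (L : List Int) (n : Int) :
    (if ((PySem.List.pyRange 0 n 1).foldl (fun r i =>
        if PySem.List.pyGetD L i 0 = 1 then r ++ [i + 1] else r) ([] : List Int)).length = 0
      then [(-1 : Int)]
      else (PySem.List.pyRange 0 n 1).foldl (fun r i =>
        if PySem.List.pyGetD L i 0 = 1 then r ++ [i + 1] else r) ([] : List Int))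
    = (if ((PySem.List.pyRange 0 n 1).filter
          (fun i => PySem.List.pyGetD L i 0 == 1)).map (fun i => i + 1) = []
      then [(-1 : Int)]
      else ((PySem.List.pyRange 0 n 1).filter
          (fun i => PySem.List.pyGetD L i 0 == 1)).map (fun i => i + 1)) := by
  rw [foldl_append_ite_map (fun i => PySem.List.pyGetD L i 0 = 1) (fun i => i + 1)]
  simp only [List.nil_append]
  have hpred : (fun i => decide (PySem.List.pyGetD L i 0 = 1))
      = (fun i => PySem.List.pyGetD L i 0 == 1) := by
    funext i
    exact (beq_eq_decide _ _).symm
  rw [hpred]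
  by_cases hX : ((PySem.List.pyRange 0 n 1).filter
      (fun i => PySem.List.pyGetD L i 0 == 1)).map (fun i => i + 1) = []
  · rw [if_pos hX, hX]
    simp
  · rw [if_neg hX, if_neg fun hlen => hX (List.length_eq_zero_iff.mp hlen)]

theorem hay_main (n : Int) (h : List Int) (hp : PreHay n h) (hd : ¬ NegPairHay n h) :
    find_like_hay n h = findLikeHayB n h := by
  by_cases h1 : n = 1
  · simp [find_like_hay, findLikeHayB, h1]
  by_cases h2 : n = 2
  · simp only [find_like_hay, findLikeHayB, if_neg (show ¬(2:Int) = 1 by norm_num), h2]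
    split_ifs <;> simp
  -- main branch
  unfold PreHay at hp
  rw [if_neg h1, if_neg h2] at hp
  have hslice : ∀ iN : Nat,
      PySem.List.slice h (some ((iN : Nat) : Int)) (some (((iN : Nat) : Int) + 3))
        = (h.drop iN).take 3 := by
    intro iN
    have h3 : ((iN : Nat) : Int) + 3 = ((iN : Nat) : Int) + ((3 : Nat) : Int) := by norm_num
    rw [h3, PySem.List.slice_natCast_add]
  have hL :
      (PySem.List.pyRange 0 (n - 2) 1).foldl (fun hl i =>
        if find_like_in_three (PySem.List.slice h (some i) (some (i + 3))) = -1 then hl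
        else PySem.List.pySetD hl
          (find_like_in_three (PySem.List.slice h (some i) (some (i + 3))) - 1) 1)
        (List.replicate n.toNat (0 : Int))
      = (PySem.List.pyRange 1 (min n (h.length : Int)) 1).foldl (fun lk q =>
        if PySem.List.pyGetD h q 0 = PySem.List.pyGetD h (q - 1) 0 ∨
            (2 ≤ q ∧ PySem.List.pyGetD h q 0 = PySem.List.pyGetD h (q - 2) 0)
        then PySem.List.pySetD lk (PySem.List.pyGetD h q 0 - 1) 1 else lk)
        (List.replicate n.toNat (0 : Int)) := by
    apply List.ext_getElem?
    intro j
    have hrA : ∀ i ∈ PySem.List.pyRange 0 (n - 2) 1,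
        ¬ find_like_in_three (PySem.List.slice h (some i) (some (i + 3))) = -1 →
        (-(((List.replicate n.toNat (0:Int)).length : Nat) : Int) ≤
            find_like_in_three (PySem.List.slice h (some i) (some (i + 3))) - 1 ∧
          find_like_in_three (PySem.List.slice h (some i) (some (i + 3))) - 1 <
            ((List.replicate n.toNat (0:Int)).length : Nat)) := by
      intro i hiR hcond
      rw [PySem.List.mem_pyRange_one] at hiR
      obtain ⟨hi0, hilt⟩ := hiR
      obtain ⟨iN, rfl⟩ : ∃ iN : Nat, i = ((iN : Nat) : Int) := ⟨i.toNat, by omega⟩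
      rw [hslice iN] at hcond ⊢
      obtain ⟨qN, hqlen, hqn, hq1, hqv, hqpair⟩ :=
        pair_of_window n h iN (by omega) _ rfl hcond
      have hbound := hp qN hqlen hqn hq1 hqpair
      simp only [List.length_replicate]
      omega
    have hrB : ∀ q ∈ PySem.List.pyRange 1 (min n (h.length : Int)) 1,
        (PySem.List.pyGetD h q 0 = PySem.List.pyGetD h (q - 1) 0 ∨
          (2 ≤ q ∧ PySem.List.pyGetD h q 0 = PySem.List.pyGetD h (q - 2) 0)) →
        (-(((List.replicate n.toNat (0:Int)).length : Nat) : Int) ≤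
            PySem.List.pyGetD h q 0 - 1 ∧
          PySem.List.pyGetD h q 0 - 1 < ((List.replicate n.toNat (0:Int)).length : Nat)) := by
      intro q hqR hcond
      rw [PySem.List.mem_pyRange_one] at hqR
      obtain ⟨hq1, hqlt⟩ := hqR
      have hqn : q < n := lt_of_lt_of_le hqlt (min_le_left _ _)
      have hqlen : q < (h.length : Int) := lt_of_lt_of_le hqlt (min_le_right _ _)
      have e0 : PySem.List.pyGetD h q 0 = h.getD q.toNat 0 := by
        conv_lhs => rw [show q = ((q.toNat : Nat) : Int) from by omega]
        rw [PySem.List.pyGetD_natCast]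
      have e1 : PySem.List.pyGetD h (q - 1) 0 = h.getD (q.toNat - 1) 0 := by
        have hc : q - 1 = ((q.toNat - 1 : Nat) : Int) := by omega
        rw [hc, PySem.List.pyGetD_natCast]
      have hpairN : h.getD q.toNat 0 = h.getD (q.toNat - 1) 0 ∨
          (2 ≤ q.toNat ∧ h.getD q.toNat 0 = h.getD (q.toNat - 2) 0) := by
        rcases hcond with hc | ⟨h2q, hc⟩
        · rw [e0, e1] at hc
          exact Or.inl hc
        · have e2 : PySem.List.pyGetD h (q - 2) 0 = h.getD (q.toNat - 2) 0 := by
            have hc2 : q - 2 = ((q.toNat - 2 : Nat) : Int) := by omega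
            rw [hc2, PySem.List.pyGetD_natCast]
          rw [e0, e2] at hc
          exact Or.inr ⟨by omega, hc⟩
      have hbound := hp q.toNat (by omega) (by omega) (by omega) hpairN
      rw [e0]
      simp only [List.length_replicate]
      omega
    have hAj := mark_getElem?_skip
        (fun i => find_like_in_three (PySem.List.slice h (some i) (some (i + 3))) = -1)
        (fun i => find_like_in_three (PySem.List.slice h (some i) (some (i + 3))) - 1)
        (PySem.List.pyRange 0 (n - 2) 1) (List.replicate n.toNat (0 : Int)) j
        (by simpa using hrA)
    have hBj := mark_getElem?
        (fun q => PySem.List.pyGetD h q 0 = PySem.List.pyGetD h (q - 1) 0 ∨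
          (2 ≤ q ∧ PySem.List.pyGetD h q 0 = PySem.List.pyGetD h (q - 2) 0))
        (fun q => PySem.List.pyGetD h q 0 - 1)
        (PySem.List.pyRange 1 (min n (h.length : Int)) 1) (List.replicate n.toNat (0 : Int)) j
        (by simpa using hrB)
    refine hAj.trans (Eq.trans ?_ hBj.symm)
    refine if_congr ?_ rfl rfl
    simp only [List.length_replicate]
    constructor
    · rintro ⟨i, hiR, hcond, hkey⟩
      rw [PySem.List.mem_pyRange_one] at hiR
      obtain ⟨hi0, hilt⟩ := hiR
      obtain ⟨iN, rfl⟩ : ∃ iN : Nat, i = ((iN : Nat) : Int) := ⟨i.toNat, by omega⟩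
      rw [hslice iN] at hcond hkey
      obtain ⟨qN, hqlen, hqn, hq1, hqv, hqpair⟩ :=
        pair_of_window n h iN (by omega) _ rfl hcond
      have e0 : PySem.List.pyGetD h ((qN : Nat) : Int) 0 = h.getD qN 0 :=
        PySem.List.pyGetD_natCast h qN 0
      have e1 : PySem.List.pyGetD h (((qN : Nat) : Int) - 1) 0 = h.getD (qN - 1) 0 := by
        have hc : ((qN : Nat) : Int) - 1 = ((qN - 1 : Nat) : Int) := by omega
        rw [hc, PySem.List.pyGetD_natCast]
      refine ⟨((qN : Nat) : Int), ?_, ?_, ?_⟩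
      · rw [PySem.List.mem_pyRange_one]
        exact ⟨by omega, lt_min (by omega) (by omega)⟩
      · rcases hqpair with hc | ⟨h2q, hc⟩
        · exact Or.inl (by rw [e0, e1]; exact hc)
        · have e2 : PySem.List.pyGetD h (((qN : Nat) : Int) - 2) 0 = h.getD (qN - 2) 0 := by
            have hc2 : ((qN : Nat) : Int) - 2 = ((qN - 2 : Nat) : Int) := by omega
            rw [hc2, PySem.List.pyGetD_natCast]
          exact Or.inr ⟨by omega, by rw [e0, e2]; exact hc⟩
      · rw [e0, hqv]
        exact hkey
    · rintro ⟨q, hqR, hcond, hkey⟩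
      rw [PySem.List.mem_pyRange_one] at hqR
      obtain ⟨hq1, hqlt⟩ := hqR
      have hqn : q < n := lt_of_lt_of_le hqlt (min_le_left _ _)
      have hqlen : q < (h.length : Int) := lt_of_lt_of_le hqlt (min_le_right _ _)
      have hn3 : 3 ≤ n := by omega
      have e0 : PySem.List.pyGetD h q 0 = h.getD q.toNat 0 := by
        conv_lhs => rw [show q = ((q.toNat : Nat) : Int) from by omega]
        rw [PySem.List.pyGetD_natCast]
      have e1 : PySem.List.pyGetD h (q - 1) 0 = h.getD (q.toNat - 1) 0 := by
        have hc : q - 1 = ((q.toNat - 1 : Nat) : Int) := by omega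
        rw [hc, PySem.List.pyGetD_natCast]
      have hpairN : h.getD q.toNat 0 = h.getD (q.toNat - 1) 0 ∨
          (2 ≤ q.toNat ∧ h.getD q.toNat 0 = h.getD (q.toNat - 2) 0) := by
        rcases hcond with hc | ⟨h2q, hc⟩
        · rw [e0, e1] at hc
          exact Or.inl hc
        · have e2 : PySem.List.pyGetD h (q - 2) 0 = h.getD (q.toNat - 2) 0 := by
            have hc2 : q - 2 = ((q.toNat - 2 : Nat) : Int) := by omega
            rw [hc2, PySem.List.pyGetD_natCast]
          rw [e0, e2] at hc
          exact Or.inr ⟨by omega, hc⟩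
      have hvne : h.getD q.toNat 0 ≠ -1 := by
        intro hveq
        apply hd
        refine ⟨h1, h2, q.toNat, by omega, hveq, ?_⟩
        rcases hpairN with hc | ⟨h2q, hc⟩
        · exact Or.inl ⟨by rw [← hc]; exact hveq, by omega⟩
        · exact Or.inr ⟨by rw [← hc]; exact hveq, h2q⟩
      obtain ⟨iN, hiN, hf3⟩ :=
        window_of_pair n h q.toNat (by omega) (by omega) (by omega) hn3 hpairN
      refine ⟨((iN : Nat) : Int), ?_, ?_, ?_⟩
      · rw [PySem.List.mem_pyRange_one]
        exact ⟨by omega, by omega⟩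
      · rw [hslice iN, hf3]
        exact hvne
      · rw [hslice iN, hf3, ← e0]
        exact hkey
  -- assemble: unfold both ports, replace A's liked array by B's, finish with tail_eq
  have hcong := congrArg (fun L : List Int =>
    if ((PySem.List.pyRange 0 n 1).foldl (fun r i =>
        if PySem.List.pyGetD L i 0 = 1 then r ++ [i + 1] else r) ([] : List Int)).length = 0
    then [(-1 : Int)]
    else (PySem.List.pyRange 0 n 1).foldl (fun r i =>
        if PySem.List.pyGetD L i 0 = 1 then r ++ [i + 1] else r) ([] : List Int)) hL
  simp only [find_like_hay, findLikeHayB, if_neg h1, if_neg h2]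
  refine hcong.trans ?_
  beta_reduce
  exact tail_eq ((PySem.List.pyRange 1 (min n (h.length : Int)) 1).foldl (fun lk q =>
      if PySem.List.pyGetD h q 0 = PySem.List.pyGetD h (q - 1) 0 ∨
          (2 ≤ q ∧ PySem.List.pyGetD h q 0 = PySem.List.pyGetD h (q - 2) 0)
      then PySem.List.pySetD lk (PySem.List.pyGetD h q 0 - 1) 1 else lk)
    (List.replicate n.toNat (0 : Int))) n

-- ===== VERDICT (by name: the statement is the Claim_ definition above) =====
theorem find_like_hay_all_tests_spec : Claim_equal_find_like_hay_all_tests := by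
  intro nt ts _hDom hPre
  obtain ⟨hlen, hall⟩ := hPre
  show find_like_hay_all_tests nt ts = find_like_hay_all_tests_alt nt ts
  simp only [find_like_hay_all_tests, find_like_hay_all_tests_alt]
  rw [PySem.List.foldl_append_singleton_eq_map, PySem.List.foldl_append_singleton_eq_map]
  simp only [List.nil_append]
  apply List.map_congr_left
  intro i hiR
  rw [PySem.List.mem_pyRange_one] at hiR
  obtain ⟨hi0, hilt⟩ := hiR
  have hti : i.toNat < ts.length := by omega
  have htn : i.toNat < nt.toNat := by omega
  have ht : PySem.List.pyGetD ts i [] = ts[i.toNat] :=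
    PySem.List.pyGetD_eq_getElem ts [] hi0 (by omega)
  have hmem : ts[i.toNat] ∈ ts.take nt.toNat := by
    have hg : (ts.take nt.toNat)[i.toNat]'(by simp; omega) = ts[i.toNat] := List.getElem_take
    rw [← hg]
    exact List.getElem_mem _
  obtain ⟨_, htpre, htnd⟩ := hall ts[i.toNat] hmem
  rw [ht, PySem.List.slice_from_one, PySem.List.pyGetD_zero]
  exact hay_main _ _ htpre htnd
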